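-- pv_equiv track=rewrite | github.com/huid857/wanzheng- | advanced_shoe_analyzer.py | _count_single_alternations
-- ===== SOURCE A (Python) =====
-- def _count_single_alternations(data):
--     """
--     统计严格单跳局数（BPBP 交替格式）。
--     Bug#12修复：只统计上一局不同、上上局也不同（严格交替）的局。
--
--     Returns:
--         处于严格单跳结构中的局数
--     """
--     if len(data) < 3:
--         return 0
--
--     count = 0
--     for i in range(2, len(data)):
--         # 严格单跳：当前 ≠ 上一，上一 ≠ 上上（BPBP）
--         if data[i] != data[i - 1] and data[i - 1] != data[i - 2]:
--             count += 1
--     return count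
-- ===== SOURCE B (Python) =====
-- def _count_single_alternations(data):
--     # Run-length decomposition: split data into maximal runs in which every
--     # adjacent pair differs; a run of length L contains exactly max(L-2, 0)
--     # strictly alternating triples, so sum that over the runs.
--     total = 0
--     run = 1
--     prev = None
--     started = False
--     for x in data:
--         if not started:
--             started = True
--         elif x != prev:
--             run += 1
--         else:
--             total += max(run - 2, 0)
--             run = 1
--         prev = x
--     total += max(run - 2, 0)
--     return total
-- ===== Notes on version B (the rewrite author's own statement) =====
-- stated objective: alternative
-- what changed: Replaces the three-element sliding-window index loop with a run-length decomposition: the sequence is segmented into maximal runs whose adjacent elements all differ, and each run of length L contributes max(L-2, 0) to the total.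
import Mathlib
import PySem

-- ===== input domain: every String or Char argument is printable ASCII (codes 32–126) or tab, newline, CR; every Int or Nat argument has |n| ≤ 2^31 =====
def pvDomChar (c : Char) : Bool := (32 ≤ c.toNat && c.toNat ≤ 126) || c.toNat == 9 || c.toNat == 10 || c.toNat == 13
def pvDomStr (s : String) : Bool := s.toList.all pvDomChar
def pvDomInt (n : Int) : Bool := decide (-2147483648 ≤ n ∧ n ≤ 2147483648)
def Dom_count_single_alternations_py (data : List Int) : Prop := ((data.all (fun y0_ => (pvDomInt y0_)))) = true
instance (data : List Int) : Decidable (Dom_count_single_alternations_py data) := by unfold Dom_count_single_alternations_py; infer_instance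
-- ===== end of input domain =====

-- B replaces A's three-element sliding-window loop by a run-length decomposition:
-- maximal runs of pairwise-distinct adjacent elements, each run of length L
-- contributing max(L-2, 0) (alternative decomposition, same cost).

-- ===== PORT A =====
def count_single_alternations_py (data : List Int) : Int :=
  if data.length < 3 then 0
  else
    (PySem.List.pyRange 2 (data.length : Int) 1).foldl
      (fun count i =>
        if PySem.List.pyGetD data i 0 ≠ PySem.List.pyGetD data (i - 1) 0 ∧
           PySem.List.pyGetD data (i - 1) 0 ≠ PySem.List.pyGetD data (i - 2) 0
        then count + 1 else count) 0

-- ===== PORT B =====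
-- the loop body of Source B: state (total, run, prev); prev = none encodes 'not started'
def stepB (st : Int × Int × Option Int) (x : Int) : Int × Int × Option Int :=
  match st with
  | (total, run, none) => (total, run, some x)
  | (total, run, some p) =>
    if x ≠ p then (total, run + 1, some x)
    else (total + max (run - 2) 0, 1, some x)

def count_single_alternations_py_alt (data : List Int) : Int :=
  let s := data.foldl stepB (0, 1, none)
  s.1 + max (s.2.1 - 2) 0

-- ===== PRECONDITION & SPEC =====
def Spec_count_single_alternations_py (data : List Int) (out : Int) : Prop := out = count_single_alternations_py_alt data
instance (data : List Int) (out : Int) : Decidable (Spec_count_single_alternations_py data out) := by unfold Spec_count_single_alternations_py; infer_instance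

-- ===== CLAIM (what is proved, stated in full; the proofs are below) =====
def Claim_equal_count_single_alternations_py : Prop := ∀ (data : List Int), Dom_count_single_alternations_py data → Spec_count_single_alternations_py data (count_single_alternations_py data)

-- ===== LEMMAS AND PROOFS =====

-- canonical structural count of strictly alternating triples
def triCount : List Int → Int
  | a :: b :: c :: t => (if c ≠ b ∧ b ≠ a then 1 else 0) + triCount (b :: c :: t)
  | _ => 0

-- triple count of (…, p) ++ l where b says whether the pair just before p differed
def Trip (b : Bool) (p : Int) : List Int → Int
  | [] => 0
  | x :: t => (if x ≠ p ∧ b = true then 1 else 0) + Trip (x != p) x t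

-- tail of B's fold, as a recursion: remaining contribution given current run and prev
def contB (run : Int) (p : Int) : List Int → Int
  | [] => max (run - 2) 0
  | x :: t => if x ≠ p then contB (run + 1) x t else max (run - 2) 0 + contB 1 x t

lemma fold_contB (l : List Int) : ∀ (total run : Int) (p : Int),
    (let s := l.foldl stepB (total, run, some p); s.1 + max (s.2.1 - 2) 0)
      = total + contB run p l := by
  induction l with
  | nil => intro total run p; simp [contB]
  | cons x t ih =>
    intro total run p
    by_cases h : x ≠ p
    · simpa [stepB, h, contB] using ih total (run + 1) x
    · simp only [List.foldl, stepB, if_neg h, contB, if_neg h]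
      rw [ih (total + max (run - 2) 0) 1 x]
      ring

lemma contB_eq_Trip (l : List Int) : ∀ (run : Int) (p : Int), 1 ≤ run →
    contB run p l = max (run - 2) 0 + Trip (decide (2 ≤ run)) p l := by
  induction l with
  | nil => intro run p _; simp [contB, Trip]
  | cons x t ih =>
    intro run p hrun
    by_cases h : x ≠ p
    · have h1 : (1 : Int) ≤ run + 1 := by omega
      have hb : (x != p) = true := by simp [h]
      rw [contB, if_pos h, ih (run + 1) x h1, Trip, hb]
      by_cases h2 : 2 ≤ run
      · have e1 : max (run + 1 - 2) 0 = max (run - 2) 0 + 1 := by omega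
        have e2 : (2 : Int) ≤ run + 1 := by omega
        simp only [h2, e1, e2, hb, ne_eq, h, not_false_eq_true, decide_true, true_and, if_true]
        ring
      · have hr1 : run = 1 := by omega
        subst hr1
        have h2' : ¬ (2 : Int) ≤ 1 := by norm_num
        simp [h2', h]
    · rw [contB, if_neg h, Trip]
      have hx : x = p := by simpa using h
      subst hx
      simp only [ne_eq, not_true_eq_false, false_and, if_false, bne_self_eq_false]
      rw [ih 1 x (by norm_num)]
      norm_num

lemma triCount_cons_cons (l : List Int) : ∀ (pp p : Int),
    triCount (pp :: p :: l) = Trip (p != pp) p l := by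
  induction l with
  | nil => intro pp p; simp [triCount, Trip]
  | cons x t ih =>
    intro pp p
    rw [triCount, ih p x, Trip]
    congr 1
    by_cases h1 : x ≠ p <;> by_cases h2 : p ≠ pp <;> simp [h1, h2]

lemma triCount_cons (l : List Int) (a : Int) : triCount (a :: l) = Trip false a l := by
  cases l with
  | nil => simp [triCount, Trip]
  | cons x t =>
    rw [triCount_cons_cons t a x, Trip]
    simp

lemma alt_eq_triCount (data : List Int) :
    count_single_alternations_py_alt data = triCount data := by
  cases data with
  | nil => simp [count_single_alternations_py_alt, triCount]
  | cons a l =>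
    unfold count_single_alternations_py_alt
    simp only [List.foldl, stepB]
    rw [fold_contB l 0 1 a, contB_eq_Trip l 1 a (by norm_num)]
    rw [triCount_cons l a]
    norm_num

-- A's loop body as an indicator function on a Nat index into data
def indA (data : List Int) (j : Nat) : Int :=
  if data.getD (j + 2) 0 ≠ data.getD (j + 1) 0 ∧ data.getD (j + 1) 0 ≠ data.getD j 0
  then 1 else 0

-- A equals the 0/1-sum of its indicator over the shifted index range
lemma a_eq_sum (data : List Int) (h : ¬ data.length < 3) :
    count_single_alternations_py data
      = ((List.range (data.length - 2)).map (indA data)).sum := by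
  unfold count_single_alternations_py
  rw [if_neg h]
  have hfun : (fun (count i : Int) =>
        if PySem.List.pyGetD data i 0 ≠ PySem.List.pyGetD data (i - 1) 0 ∧
           PySem.List.pyGetD data (i - 1) 0 ≠ PySem.List.pyGetD data (i - 2) 0
        then count + 1 else count)
      = (fun (count i : Int) => count +
          (if PySem.List.pyGetD data i 0 ≠ PySem.List.pyGetD data (i - 1) 0 ∧
              PySem.List.pyGetD data (i - 1) 0 ≠ PySem.List.pyGetD data (i - 2) 0
           then 1 else 0)) := by
    funext count i; split_ifs <;> simp
  rw [hfun, PySem.List.foldl_add, PySem.List.pyRange_one, List.map_map]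
  have hN : (((data.length : Int)) - 2).toNat = data.length - 2 := by omega
  rw [hN, zero_add]
  congr 1
  apply List.map_congr_left
  intro k _
  have e2 : (2 : Int) + (k : Int) = ((k + 2 : Nat) : Int) := by push_cast; ring
  have e1 : ((k + 2 : Nat) : Int) - 1 = ((k + 1 : Nat) : Int) := by push_cast; ring
  have e0 : ((k + 2 : Nat) : Int) - 2 = ((k : Nat) : Int) := by push_cast; ring
  simp only [Function.comp, e2, e1, e0, PySem.List.pyGetD_natCast, indA]

-- the indicator sum equals the canonical count
lemma sum_eq_triCount (data : List Int) :
    ((List.range (data.length - 2)).map (indA data)).sum = triCount data := by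
  induction data with
  | nil => simp [triCount]
  | cons a l ih =>
    cases l with
    | nil => simp [triCount]
    | cons b m =>
      cases m with
      | nil => simp [triCount]
      | cons c t =>
        have hlen : (a :: b :: c :: t).length - 2 = (t.length) + 1 := by simp
        have hlen2 : (b :: c :: t).length - 2 = t.length := by simp
        rw [hlen, List.range_succ_eq_map, List.map_cons, List.sum_cons, List.map_map]
        have hshift : (indA (a :: b :: c :: t)) ∘ Nat.succ = indA (b :: c :: t) := by
          funext j
          simp [indA, Function.comp]
        rw [hshift]
        rw [hlen2] at ih
        rw [ih]
        simp [triCount, indA]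

-- ===== VERDICT (by name: the statement is the Claim_ definition above) =====
theorem count_single_alternations_py_spec : Claim_equal_count_single_alternations_py := by
  intro data _
  unfold Spec_count_single_alternations_py
  rw [alt_eq_triCount]
  by_cases h : data.length < 3
  · match data, h with
    | [], _ => rfl
    | [_], _ => rfl
    | [_, _], _ => rfl
  · rw [a_eq_sum data h, sum_eq_triCount]
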